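-- pv_equiv track=rewrite | github.com/shivamkumar7878/Code-Signal-Languge | Intro/Dark Wilderness/digitDegree.py | digitDegree
-- ===== SOURCE A (Python) =====
-- def digitsum(num):
--     return sum( [ int(char) for char in str(num) ] )
--
-- def digitDegree(n):
--     if n/10==0:
--         return 0
--
--     counter=0
--     while int(n/10)!=0:
--         n = digitsum(n)
--         counter+=1
--     return counter
-- ===== SOURCE B (Python) =====
-- def digitDegree(n):
--     if -10 < n < 10:
--         return 0
--     s = 0
--     m = abs(n)
--     while m:
--         s += m % 10
--         m //= 10
--     return 1 + digitDegree(s)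
-- ===== Notes on version B (the rewrite author's own statement) =====
-- stated objective: alternative
-- what changed: A's flat while-loop counting string-based digitsum() calls is replaced by a direct recursion on the digit-sum recurrence whose digit sum is computed arithmetically by repeated divmod-by-ten instead of via str()/int().
import Mathlib
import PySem

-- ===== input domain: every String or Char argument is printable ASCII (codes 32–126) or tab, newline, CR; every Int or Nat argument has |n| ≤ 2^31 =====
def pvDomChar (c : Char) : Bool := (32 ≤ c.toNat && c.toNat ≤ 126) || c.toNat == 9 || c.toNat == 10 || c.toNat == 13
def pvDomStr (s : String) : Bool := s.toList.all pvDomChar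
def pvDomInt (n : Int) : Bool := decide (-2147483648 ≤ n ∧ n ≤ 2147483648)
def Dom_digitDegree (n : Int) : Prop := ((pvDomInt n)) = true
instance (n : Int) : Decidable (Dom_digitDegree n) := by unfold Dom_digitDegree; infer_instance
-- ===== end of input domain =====

-- B replaces A's string-based digitsum + flat counter loop by a direct recursion on the
-- digit-sum recurrence with arithmetic digit extraction (objective: alternative).

-- ===== PORT A =====
-- digitsum(num) = sum(int(char) for char in str(num)); int('-') raises ValueError in
-- Python (ofChars? = none), taken as 0 here — those inputs (n ≤ -10) are outside Pre_.
def digitsum (num : Int) : Int :=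
  ((PySem.Int.toChars num).map (fun c => (PySem.Int.ofChars? [c]).getD 0)).sum

-- 'while int(n/10) != 0: n = digitsum(n); counter += 1' — fuel-bounded transcription
-- (fuel n.natAbs + 1 always suffices on Pre_; the float truncation int(n/10) equals
-- Int.tdiv n 10 exactly on Dom, where |n| ≤ 2^31 keeps n/10 rounding below 1/2).
def aLoop : Nat → Int → Int → Int
  | 0, _, counter => counter
  | f+1, n, counter =>
    if n.tdiv 10 ≠ 0 then aLoop f (digitsum n) (counter + 1) else counter

def digitDegree (n : Int) : Int :=
  if n = 0 then 0          -- 'if n/10 == 0': the float n/10 is 0.0 iff n = 0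
  else aLoop (n.natAbs + 1) n 0

-- ===== PORT B =====
-- 'while m: s += m % 10; m //= 10' — fuel-bounded transcription (fuel m.natAbs + 1 suffices)
def bSumLoop : Nat → Int → Int → Int
  | 0, _, s => s
  | f+1, m, s =>
    if m ≠ 0 then bSumLoop f (PySem.Int.floordiv m 10) (s + PySem.Int.mod m 10) else s

-- the recursion 'return 1 + digitDegree(s)' — fuel-bounded (n.natAbs + 1 steps suffice)
def bRec : Nat → Int → Int
  | 0, _ => 0
  | f+1, n =>
    if -10 < n ∧ n < 10 then 0
    else 1 + bRec f (bSumLoop ((|n|).natAbs + 1) |n| 0)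

def digitDegree_alt (n : Int) : Int := bRec (n.natAbs + 1) n

-- ===== PRECONDITION & SPEC =====
-- Pre_ excludes exactly the negative inputs with two or more digits, where A raises
-- ValueError (int('-') inside digitsum); B's value there is not claimed.
def Pre_digitDegree (n : Int) : Prop := -10 < n
instance (n : Int) : Decidable (Pre_digitDegree n) := by unfold Pre_digitDegree; infer_instance
def pvWitness_digitDegree : Int := (42)

def Spec_digitDegree (n : Int) (out : Int) : Prop := out = digitDegree_alt n
instance (n : Int) (out : Int) : Decidable (Spec_digitDegree n out) := by unfold Spec_digitDegree; infer_instance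

-- ===== CLAIM (what is proved, stated in full; the proofs are below) =====
def Claim_equal_digitDegree : Prop := ∀ (n : Int), Dom_digitDegree n → Pre_digitDegree n → Spec_digitDegree n (digitDegree n)

-- ===== LEMMAS AND PROOFS =====

-- the value int(c) contributes for one character of str(num)
def chv (c : Char) : Int := (PySem.Int.ofChars? [c]).getD 0

theorem chv_digitChar (d : Nat) (hd : d < 10) : chv (Nat.digitChar d) = (d : Int) := by
  interval_cases d <;> decide

theorem chv_neg : chv '-' = 0 := by decide

theorem tdiv10_eq_zero (n : Int) : n.tdiv 10 = 0 ↔ (-10 < n ∧ n < 10) := by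
  rcases n with m | m <;> simp [Int.tdiv] <;> omega

theorem sum_map_chv_toDigitsCore (f : Nat) : ∀ (n : Nat) (l : List Char), n < f →
    ((Nat.toDigitsCore 10 f n l).map chv).sum
      = ((Nat.digits 10 n).sum : Int) + ((l.map chv).sum) := by
  induction f with
  | zero => intro n l h; omega
  | succ f ih =>
    intro n l h
    rw [Nat.toDigitsCore]
    by_cases h10 : n / 10 = 0
    · simp only [h10, if_pos]
      rcases Nat.eq_zero_or_pos n with h0 | h0
      · subst h0; simp [chv_digitChar 0 (by omega)]
      · rw [Nat.digits_def' (by omega) h0]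
        have hn : n % 10 = n := Nat.mod_eq_of_lt (by omega)
        simp [h10, hn, chv_digitChar n (by omega), add_comm]
    · simp only [h10, ite_false]
      have hlt : n / 10 < f := by
        have := Nat.div_lt_self (by omega : 0 < n) (by omega : 1 < 10)
        omega
      rw [ih (n / 10) _ hlt, Nat.digits_def' (by norm_num) (by omega : 0 < n)]
      simp only [List.map_cons, List.sum_cons, chv_digitChar (n % 10) (Nat.mod_lt _ (by omega))]
      push_cast
      ring

theorem sum_map_chv_toDigits (m : Nat) :
    ((Nat.toDigits 10 m).map chv).sum = ((Nat.digits 10 m).sum : Int) := by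
  have := sum_map_chv_toDigitsCore (m + 1) m [] (by omega)
  simpa [Nat.toDigits] using this

theorem digitsum_eq (n : Int) : digitsum n = ((Nat.digits 10 n.natAbs).sum : Int) := by
  unfold digitsum PySem.Int.toChars
  by_cases h : n < 0
  · rw [if_pos h]
    show chv '-' + _ = _
    rw [chv_neg, zero_add]
    exact sum_map_chv_toDigits n.natAbs
  · rw [if_neg h]
    have : n.toNat = n.natAbs := by omega
    rw [this]; exact sum_map_chv_toDigits n.natAbs

theorem bSumLoop_eq (f : Nat) : ∀ (m s : Int), 0 ≤ m → m.toNat < f →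
    bSumLoop f m s = s + ((Nat.digits 10 m.toNat).sum : Int) := by
  induction f with
  | zero => intro m s _ h; omega
  | succ f ih =>
    intro m s hm h
    rw [bSumLoop]
    by_cases h0 : m = 0
    · simp [h0]
    · rw [if_pos h0]
      have hpos : (0:Int) < m := by omega
      rw [PySem.Int.floordiv_eq_ediv_of_pos (by norm_num),
          PySem.Int.mod_eq_emod_of_pos (by norm_num)]
      have hdiv : (m / 10).toNat = m.toNat / 10 := by omega
      rw [ih (m / 10) _ (by positivity) (by omega)]
      rw [Nat.digits_def' (by norm_num) (by omega : 0 < m.toNat), hdiv]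
      simp only [List.sum_cons]
      push_cast
      omega

theorem digitsum_eq_bSumLoop (n : Int) :
    digitsum n = bSumLoop ((|n|).natAbs + 1) |n| 0 := by
  rw [bSumLoop_eq _ |n| 0 (abs_nonneg n) (by omega), digitsum_eq]
  have h1 : (|n|).toNat = n.natAbs := by
    rcases abs_cases n with ⟨h, _⟩ | ⟨h, _⟩ <;> omega
  rw [h1, zero_add]

theorem aLoop_eq_bRec (f : Nat) : ∀ (n c : Int), aLoop f n c = c + bRec f n := by
  induction f with
  | zero => intro n c; simp [aLoop, bRec]
  | succ f ih =>
    intro n c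
    rw [aLoop, bRec]
    by_cases h : -10 < n ∧ n < 10
    · rw [if_pos h, if_neg (by simpa using (tdiv10_eq_zero n).2 h)]
      ring
    · rw [if_neg h, if_pos (by simpa [tdiv10_eq_zero] using h)]
      rw [ih, ← digitsum_eq_bSumLoop]
      ring

-- ===== VERDICT (by name: the statement is the Claim_ definition above) =====
theorem digitDegree_spec : Claim_equal_digitDegree := by
  intro n _ _
  show digitDegree n = digitDegree_alt n
  unfold digitDegree digitDegree_alt
  by_cases h0 : n = 0
  · subst h0; decide
  · rw [if_neg h0, aLoop_eq_bRec, zero_add]
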